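-- pv_equiv track=rewrite | github.com/ARES3366/aladdin | aladdin-cas/src/auto_text_filter/text_spectral_cluster.py | find_class_name
-- ===== SOURCE A (Python) =====
-- from collections import Counter
--
-- def find_class_name(cluste_words):
--     class_name=[]
--     for key,val in cluste_words.items():
--         words=[]
--         for i in val:
--             words.extend(i.split(' '))
--         res = Counter(words)
--         d = sorted(res.items(), key=lambda x: x[1], reverse=True)
--         name = d[0][0]+'_'+d[1][0]
--         class_name.append(name)
--     return class_name
-- ===== SOURCE B (Python) =====
-- def find_class_name(cluste_words):
--     class_name = []
--     for val in cluste_words.values():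
--         words = [w for s in val for w in s.split(' ')]
--         counts = {}
--         for w in words:
--             counts[w] = counts.get(w, 0) + 1
--         best = None
--         second = None
--         for item in counts.items():
--             if best is None or item[1] > best[1]:
--                 second, best = best, item
--             elif second is None or item[1] > second[1]:
--                 second = item
--         class_name.append(best[0] + '_' + second[0])
--     return class_name
-- ===== Notes on version B (the rewrite author's own statement) =====
-- stated objective: alternative
-- what changed: Replaces Counter+full sort of the per-cluster frequency items by a manual counting dict and a single pass keeping the best and second-best (word,count) pairs with strict '>' comparisons, so no sort is performed.
import Mathlib
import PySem

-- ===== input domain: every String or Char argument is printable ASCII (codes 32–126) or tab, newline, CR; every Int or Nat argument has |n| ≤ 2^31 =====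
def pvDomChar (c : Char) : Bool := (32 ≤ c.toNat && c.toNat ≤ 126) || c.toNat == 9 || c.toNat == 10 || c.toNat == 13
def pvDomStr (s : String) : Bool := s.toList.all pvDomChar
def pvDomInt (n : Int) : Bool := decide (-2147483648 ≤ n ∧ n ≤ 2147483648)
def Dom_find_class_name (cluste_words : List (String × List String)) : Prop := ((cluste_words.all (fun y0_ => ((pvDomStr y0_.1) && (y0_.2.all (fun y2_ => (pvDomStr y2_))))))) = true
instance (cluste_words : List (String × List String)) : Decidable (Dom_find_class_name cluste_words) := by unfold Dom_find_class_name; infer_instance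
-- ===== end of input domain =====

-- B replaces the per-cluster sort of frequency items by a single best/second scan; alternative decomposition, same results.


-- ===== PORT A =====
-- i.split(' '): sep " " is nonempty so PySem.Str.split? always returns some (getD is never taken)
def fcnSplit (s : String) : List String := (PySem.Str.split? s " ").getD []

def find_class_name (cluste_words : List (String × List String)) : List String :=
  cluste_words.foldl (fun class_name kv =>
    let words := kv.2.foldl (fun ws i => ws ++ fcnSplit i) []
    let res := PySem.Dict.counter words
    let d := PySem.List.sorted res.items (fun x => x.2) true
    -- d[0][0] + '_' + d[1][0]; Python raises IndexError when d has < 2 items (excluded by Pre_)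
    let name := ((PySem.List.pyGet? d 0).map Prod.fst).getD "" ++ "_" ++
                ((PySem.List.pyGet? d 1).map Prod.fst).getD ""
    class_name ++ [name]) []

-- ===== PORT B =====
-- one step of B's best/second scan: 'if best is None or item[1] > best[1]: … elif second is None or item[1] > second[1]: …'
def fcnStep (acc : Option (String × Int) × Option (String × Int)) (item : String × Int) :
    Option (String × Int) × Option (String × Int) :=
  if acc.1.all (fun p => decide (p.2 < item.2)) then (some item, acc.1)
  else if acc.2.all (fun p => decide (p.2 < item.2)) then (acc.1, some item)
  else acc

def find_class_name_alt (cluste_words : List (String × List String)) : List String :=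
  cluste_words.foldl (fun class_name kv =>
    let words := kv.2.flatMap (fun s => fcnSplit s)
    let counts := words.foldl (fun d w => d.insert w (d.getD w 0 + 1)) PySem.Dict.empty
    let bs := counts.items.foldl fcnStep (none, none)
    -- best[0] + '_' + second[0]; Python raises TypeError when a pair is still None (excluded by Pre_)
    class_name ++ [(bs.1.map Prod.fst).getD "" ++ "_" ++ (bs.2.map Prod.fst).getD ""]) []

-- ===== PRECONDITION & SPEC =====
-- Pre_ excludes inputs where some cluster yields fewer than two distinct words after splitting on ' ':
-- there Python A raises IndexError (d[0]/d[1]) and Python B raises TypeError, so neither returns.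
def Pre_find_class_name (cluste_words : List (String × List String)) : Prop :=
  ∀ kv ∈ cluste_words, 2 ≤ ((kv.2.flatMap (fun s => fcnSplit s)).dedup).length
instance (cluste_words : List (String × List String)) : Decidable (Pre_find_class_name cluste_words) := by unfold Pre_find_class_name; infer_instance
def pvWitness_find_class_name : (List (String × List String)) := [("k", ["a b"])]
def Spec_find_class_name (cluste_words : List (String × List String)) (out : List String) : Prop := out = find_class_name_alt cluste_words
instance (cluste_words : List (String × List String)) (out : List String) : Decidable (Spec_find_class_name cluste_words out) := by unfold Spec_find_class_name; infer_instance

-- ===== CLAIM (what is proved, stated in full; the proofs are below) =====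
def Claim_equal_find_class_name : Prop := ∀ (cluste_words : List (String × List String)), Dom_find_class_name cluste_words → Pre_find_class_name cluste_words → Spec_find_class_name cluste_words (find_class_name cluste_words)

-- ===== LEMMAS AND PROOFS =====

-- the first two elements of a list, as B's (best, second) state
def fcnTop2 {α : Type} (l : List α) : Option α × Option α := (l.head?, l.tail.head?)

theorem pyGet?_zero {α : Type} (l : List α) : PySem.List.pyGet? l 0 = l.head? := by
  cases l <;> simp [PySem.List.pyGet?, PySem.List.pyIdx?]

theorem pyGet?_one {α : Type} (l : List α) : PySem.List.pyGet? l 1 = l.tail.head? := by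
  rcases l with _ | ⟨y, _ | ⟨z, rest⟩⟩ <;>
    simp [PySem.List.pyGet?, PySem.List.pyIdx?]

theorem fcnTop2_insertBy (x : String × Int) (acc : List (String × Int)) :
    fcnTop2 (PySem.List.insertBy (fun a b => decide (((fun p => p.2) b) < ((fun p => p.2) a))) x acc)
      = fcnStep (fcnTop2 acc) x := by
  rcases acc with _ | ⟨y, _ | ⟨z, rest⟩⟩ <;>
    simp only [PySem.List.insertBy, fcnTop2, fcnStep] <;> split_ifs <;>
    simp_all [Option.all]
  all_goals omega

theorem fcnTop2_foldl (ps acc : List (String × Int)) :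
    fcnTop2 (ps.foldl (fun acc x =>
        PySem.List.insertBy (fun a b => decide (((fun p => p.2) b) < ((fun p => p.2) a))) x acc) acc)
      = ps.foldl fcnStep (fcnTop2 acc) := by
  induction ps generalizing acc with
  | nil => rfl
  | cons x t ih => simp only [List.foldl_cons, ih, fcnTop2_insertBy]

theorem fcnTop2_sorted (ps : List (String × Int)) :
    fcnTop2 (PySem.List.sorted ps (fun x => x.2) true) = ps.foldl fcnStep (none, none) := by
  rw [PySem.List.sorted_rev_eq_foldl_insertBy]
  exact fcnTop2_foldl ps []

theorem fcn_name_eq (kv : String × List String) :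
    (let words := kv.2.foldl (fun ws i => ws ++ fcnSplit i) []
     let res := PySem.Dict.counter words
     let d := PySem.List.sorted res.items (fun x => x.2) true
     ((PySem.List.pyGet? d 0).map Prod.fst).getD "" ++ "_" ++
       ((PySem.List.pyGet? d 1).map Prod.fst).getD "")
    = (let words := kv.2.flatMap (fun s => fcnSplit s)
       let counts := words.foldl (fun d w => d.insert w (d.getD w 0 + 1)) PySem.Dict.empty
       let bs := counts.items.foldl fcnStep (none, none)
       (bs.1.map Prod.fst).getD "" ++ "_" ++ (bs.2.map Prod.fst).getD "") := by
  have hwords : kv.2.foldl (fun ws i => ws ++ fcnSplit i) []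
      = kv.2.flatMap (fun s => fcnSplit s) := by
    simpa using PySem.List.foldl_append_eq_flatMap (fun s => fcnSplit s) kv.2 []
  simp only [hwords, PySem.Dict.foldl_insert_getD_add_one_eq_counter]
  have h := fcnTop2_sorted (PySem.Dict.counter (kv.2.flatMap (fun s => fcnSplit s))).items
  simp only [fcnTop2, Prod.ext_iff] at h
  simp [pyGet?_zero, pyGet?_one, h.1, h.2]

-- ===== VERDICT (by name: the statement is the Claim_ definition above) =====
theorem find_class_name_spec : Claim_equal_find_class_name := by
  intro cluste_words _ _
  unfold Spec_find_class_name find_class_name find_class_name_alt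
  exact PySem.List.foldl_congr_mem cluste_words _ _ []
    (fun acc kv _ => by simpa using congrArg (fun n => acc ++ [n]) (fcn_name_eq kv))
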